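-- pv_equiv track=rewrite | github.com/ShadowMonarchX/Learning-Vault | DSA/q4.py | solve
-- ===== SOURCE A (Python) =====
-- def solve(A, B):
--     a = min(len(A),len(B))
--     b = max(len(A),len(B))
--     k = ""
--     for i in range(0,a) :
--         for j in range(0,b) :
--             if A[j] == B[i] and j == i:
--                 k = k + A[j]
--     if k == None :
--         return ""
--     else :
--         return k
-- ===== SOURCE B (Python) =====
-- def solve(A, B):
--     return "".join(x for x, y in zip(A, B) if x == y)
-- ===== Notes on version B (the rewrite author's own statement) =====
-- stated objective: faster
-- what changed: Replaced the nested i,j scan over max-length with a single zip over the common prefix, joining the equal characters.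
-- crash fix: When 0 < len(A) < len(B), A raises IndexError on A[j] for j beyond len(A); B returns the equal-character string over the common prefix. — e.g. on solve("ab", "abc"): A raises IndexError, B returns "ab"
import Mathlib
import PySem

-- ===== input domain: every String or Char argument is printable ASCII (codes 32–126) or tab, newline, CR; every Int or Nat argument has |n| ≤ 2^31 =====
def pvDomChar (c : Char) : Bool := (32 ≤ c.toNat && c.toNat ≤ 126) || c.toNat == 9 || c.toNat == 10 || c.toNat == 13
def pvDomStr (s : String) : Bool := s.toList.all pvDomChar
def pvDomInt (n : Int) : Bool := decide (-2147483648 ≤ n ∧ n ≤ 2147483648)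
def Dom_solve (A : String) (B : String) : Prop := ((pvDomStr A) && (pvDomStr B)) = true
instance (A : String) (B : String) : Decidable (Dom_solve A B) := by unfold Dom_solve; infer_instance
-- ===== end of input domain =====

-- B replaces A's nested O(a·b) index scan by a single zip over the common prefix (asymptotically faster).

-- ===== PORT A =====
-- literal port of A's nested loops: k accumulated as a char list, A[j]/B[i] via pyGet?
-- pvStep is the body of the inner loop: 'if A[j] == B[i] and j == i: k = k + A[j]'
-- ('none' from pyGet? = IndexError in Python; those inputs are excluded by Pre_solve)
def pvStep (aL bL : List Char) (i : ℕ) (k : List Char) (j : ℕ) : List Char :=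
  match PySem.List.pyGet? aL (j : Int), PySem.List.pyGet? bL (i : Int) with
  | some ca, some cb => if ca = cb ∧ j = i then k ++ [ca] else k
  | _, _ => k

-- (the Python 'if k == None' branch is dead code — k is always a str — and is ported as returning k)
def solve (A : String) (B : String) : String :=
  let aL := A.toList
  let bL := B.toList
  let a := min aL.length bL.length
  let b := max aL.length bL.length
  let k := (List.range a).foldl (fun k i =>
    (List.range b).foldl (pvStep aL bL i) k) []
  String.mk k

-- ===== PORT B =====
def solve_alt (A : String) (B : String) : String :=
  String.mk (((A.toList.zip B.toList).filter (fun p => p.1 == p.2)).map Prod.fst)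

-- ===== PRECONDITION & SPEC =====
-- Pre_ excludes exactly the inputs where A raises IndexError (inner loop reads A[j] for j ≥ len(A)
-- whenever 0 < len(A) < len(B)); A returns normally everywhere else.
def Pre_solve (A : String) (B : String) : Prop :=
  B.toList.length ≤ A.toList.length ∨ A.toList = []
instance (A : String) (B : String) : Decidable (Pre_solve A B) := by unfold Pre_solve; infer_instance
def pvWitness_solve : String × String := ("abc", "axc")

-- When 0 < len(A) < len(B), A raises IndexError; B returns the equal characters of the common prefix.
def Raises_solve (A : String) (B : String) : Prop :=
  0 < A.toList.length ∧ A.toList.length < B.toList.length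
instance (A : String) (B : String) : Decidable (Raises_solve A B) := by unfold Raises_solve; infer_instance
def pvRaiseWitness_solve : String × String := ("ab", "abc")
def pvRaiseWitnessOut_solve : String := "ab"

def Spec_solve (A : String) (B : String) (out : String) : Prop := out = solve_alt A B
instance (A : String) (B : String) (out : String) : Decidable (Spec_solve A B out) := by unfold Spec_solve; infer_instance

-- ===== CLAIM (what is proved, stated in full; the proofs are below) =====
def Claim_equal_solve : Prop := ∀ (A : String) (B : String), Dom_solve A B → Pre_solve A B → Spec_solve A B (solve A B)
def Claim_raises_solve : Prop := (∀ (A : String) (B : String), Dom_solve A B → Raises_solve A B → ¬ Pre_solve A B) ∧ (Dom_solve (pvRaiseWitness_solve.1) (pvRaiseWitness_solve.2) ∧ Raises_solve (pvRaiseWitness_solve.1) (pvRaiseWitness_solve.2) ∧ solve_alt (pvRaiseWitness_solve.1) (pvRaiseWitness_solve.2) = pvRaiseWitnessOut_solve)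

-- ===== LEMMAS AND PROOFS =====

-- the single-index contribution: what the inner loop appends at j = i
def pvG (aL bL : List Char) (i : ℕ) : List Char :=
  match aL[i]?, bL[i]? with
  | some ca, some cb => if ca = cb then [ca] else []
  | _, _ => []

lemma pvStep_ne (aL bL : List Char) (i : ℕ) (k : List Char) (j : ℕ) (h : j ≠ i) :
    pvStep aL bL i k j = k := by
  unfold pvStep
  cases PySem.List.pyGet? aL (j : Int) <;> cases PySem.List.pyGet? bL (i : Int) <;> simp [h]

lemma pvFoldl_not_mem (aL bL : List Char) (i : ℕ) (l : List ℕ) (k : List Char) (h : i ∉ l) :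
    l.foldl (pvStep aL bL i) k = k := by
  induction l generalizing k with
  | nil => rfl
  | cons x xs ih =>
    simp only [List.mem_cons, not_or] at h
    rw [List.foldl_cons, pvStep_ne aL bL i k x (fun hx => h.1 hx.symm)]
    exact ih _ h.2

lemma pvInner (aL bL : List Char) (i b : ℕ) (hi : i < b) (k : List Char) :
    (List.range b).foldl (pvStep aL bL i) k = k ++ pvG aL bL i := by
  induction b generalizing k with
  | zero => omega
  | succ n ih =>
    rw [List.range_succ, List.foldl_append]
    rcases Nat.lt_or_ge i n with h | h
    · rw [ih h, List.foldl_cons, List.foldl_nil, pvStep_ne aL bL i _ n (by omega)]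
    · have hin : i = n := by omega
      subst hin
      rw [pvFoldl_not_mem aL bL i (List.range i) k (by simp), List.foldl_cons, List.foldl_nil]
      unfold pvStep pvG
      simp only [PySem.List.pyGet?_natCast]
      cases aL[i]? <;> cases bL[i]? <;> simp
      split <;> simp

lemma pvOuter (aL bL : List Char) (n : ℕ) (k : List Char) :
    (List.range n).foldl (fun k i => k ++ pvG aL bL i) k =
      k ++ ((List.range n).map (pvG aL bL)).flatten := by
  induction n generalizing k with
  | zero => simp
  | succ m ih => rw [List.range_succ]; simp [ih]

lemma pvG_cons (x y : Char) (xs ys : List Char) (i : ℕ) :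
    pvG (x :: xs) (y :: ys) (i + 1) = pvG xs ys i := by
  unfold pvG; simp

lemma pvZip (aL bL : List Char) (h : bL.length ≤ aL.length) :
    ((List.range bL.length).map (pvG aL bL)).flatten =
      ((aL.zip bL).filter (fun p => p.1 == p.2)).map Prod.fst := by
  induction bL generalizing aL with
  | nil => simp
  | cons y ys ih =>
    cases aL with
    | nil => simp at h
    | cons x xs =>
      simp only [List.length_cons] at h ⊢
      rw [List.range_succ_eq_map]
      simp only [List.map_cons, List.map_map, List.flatten_cons]
      have hmap : (List.range ys.length).map (pvG (x :: xs) (y :: ys) ∘ (· + 1)) =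
          (List.range ys.length).map (pvG xs ys) := by
        apply List.map_congr_left
        intro i _
        exact pvG_cons x y xs ys i
      rw [hmap, ih xs (by omega)]
      unfold pvG
      by_cases hxy : x = y <;> simp [List.zip_cons_cons, hxy]

-- ===== VERDICT (by name: the statement is the Claim_ definition above) =====
theorem solve_spec : Claim_equal_solve := by
  intro A B _ hpre
  unfold Spec_solve solve solve_alt
  dsimp only
  rcases hpre with h | h
  · have hmin : min A.toList.length B.toList.length = B.toList.length := by omega
    have hfold : ∀ (k : List Char),
        (List.range (min A.toList.length B.toList.length)).foldl (fun k i =>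
          (List.range (max A.toList.length B.toList.length)).foldl
            (pvStep A.toList B.toList i) k) k =
        k ++ ((List.range B.toList.length).map (pvG A.toList B.toList)).flatten := by
      intro k
      have hcong : (List.range (min A.toList.length B.toList.length)).foldl (fun k i =>
          (List.range (max A.toList.length B.toList.length)).foldl
            (pvStep A.toList B.toList i) k) k =
          (List.range (min A.toList.length B.toList.length)).foldl
            (fun k i => k ++ pvG A.toList B.toList i) k := by
        apply PySem.List.foldl_congr_mem
        intro k i hi
        exact pvInner A.toList B.toList i _ (by rw [List.mem_range] at hi; omega) k
      rw [hcong, hmin, pvOuter]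
    rw [hfold [], List.nil_append, pvZip A.toList B.toList h]
  · simp [h, List.zip_nil_left]

@[simp] theorem solve_raises : Claim_raises_solve := by
  unfold Claim_raises_solve
  constructor
  · intro A B _ hr hpre
    unfold Raises_solve at hr
    unfold Pre_solve at hpre
    rcases hpre with h | h
    · omega
    · rw [h] at hr; simp at hr
  · exact ⟨by decide, by decide, by decide⟩
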